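-- pv_equiv track=rewrite | github.com/Support-Senedoo/pythonanywhere | odoo-pythonanywhere/personalize_pl_percent_analytic_budget.py | _pick_percent_expression_label
-- ===== SOURCE A (Python) =====
-- from typing import Any
--
-- def _pick_percent_expression_label(cols: list[dict[str, Any]]) -> str | None:
--     """Libellé d’expression de la colonne % (figure_type percentage ou libellé type pct_*)."""
--     for c in cols:
--         if (c.get("figure_type") or "").lower() == "percentage":
--             el = (c.get("expression_label") or "").strip()
--             if el:
--                 return el
--     for c in cols:
--         el = (c.get("expression_label") or "").strip()
--         if el and "pct" in el.lower():
--             return el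
--     return None
-- ===== SOURCE B (Python) =====
-- def _pick_percent_expression_label(cols):
--     """Single pass: percentage column returns immediately; first pct-labelled column is kept as a deferred fallback."""
--     fallback = None
--     for c in cols:
--         el = (c.get("expression_label") or "").strip()
--         if (c.get("figure_type") or "").lower() == "percentage" and el:
--             return el
--         if fallback is None and el and "pct" in el.lower():
--             fallback = el
--     return fallback
-- ===== Notes on version B (the rewrite author's own statement) =====
-- stated objective: simpler
-- what changed: Replaces A's two sequential scans (percentage pass, then pct-substring pass) by one single pass that returns a percentage label immediately and accumulates the first pct-labelled column as a deferred fallback.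
import Mathlib
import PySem

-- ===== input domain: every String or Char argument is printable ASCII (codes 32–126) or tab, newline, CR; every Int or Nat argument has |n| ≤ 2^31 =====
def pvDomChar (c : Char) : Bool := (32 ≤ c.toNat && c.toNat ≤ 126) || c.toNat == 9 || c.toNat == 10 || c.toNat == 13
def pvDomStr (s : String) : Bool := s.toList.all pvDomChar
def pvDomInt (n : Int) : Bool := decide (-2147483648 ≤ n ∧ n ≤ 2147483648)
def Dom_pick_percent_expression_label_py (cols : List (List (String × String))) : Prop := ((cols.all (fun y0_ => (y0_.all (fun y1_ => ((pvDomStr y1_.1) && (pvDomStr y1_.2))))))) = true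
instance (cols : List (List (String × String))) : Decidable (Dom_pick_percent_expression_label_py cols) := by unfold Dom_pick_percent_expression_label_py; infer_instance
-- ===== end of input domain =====

-- B fuses A's two sequential scans into one pass with a deferred pct fallback (objective: simpler).
-- ===== PORT A =====
-- c.get(k): first-match lookup in the association list (a Python dict has unique keys)
def pvGetA (c : List (String × String)) (k : String) : Option String :=
  (PySem.Dict.mk c).get? k

-- first loop of A: first column whose figure_type lowers to "percentage" and whose stripped expression_label is nonempty
def pvFirstPass (cols : List (List (String × String))) : Option String :=
  match cols with
  | [] => none
  | c :: rest =>
    if PySem.Str.lower ((pvGetA c "figure_type").getD "") = "percentage" then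
      let el := PySem.Str.strip ((pvGetA c "expression_label").getD "")
      if el ≠ "" then some el else pvFirstPass rest
    else pvFirstPass rest

-- second loop of A: first column whose stripped expression_label is nonempty and contains "pct" (lowercased)
def pvSecondPass (cols : List (List (String × String))) : Option String :=
  match cols with
  | [] => none
  | c :: rest =>
    let el := PySem.Str.strip ((pvGetA c "expression_label").getD "")
    if el ≠ "" ∧ PySem.Str.isIn "pct" (PySem.Str.lower el) = true then some el
    else pvSecondPass rest

def pick_percent_expression_label_py (cols : List (List (String × String))) : Option String :=
  match pvFirstPass cols with
  | some el => some el
  | none => pvSecondPass cols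

-- ===== PORT B =====
-- the single for-loop of B, carrying the recorded fallback
def pvLoopB (cols : List (List (String × String))) (fallback : Option String) : Option String :=
  match cols with
  | [] => fallback
  | c :: rest =>
    let el := PySem.Str.strip ((pvGetA c "expression_label").getD "")
    if PySem.Str.lower ((pvGetA c "figure_type").getD "") = "percentage" ∧ el ≠ "" then
      some el
    else
      pvLoopB rest
        (match fallback with
         | some x => some x
         | none =>
           if el ≠ "" ∧ PySem.Str.isIn "pct" (PySem.Str.lower el) = true then some el else none)

def pick_percent_expression_label_py_alt (cols : List (List (String × String))) : Option String :=
  pvLoopB cols none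

-- ===== PRECONDITION & SPEC =====
def Spec_pick_percent_expression_label_py (cols : List (List (String × String))) (out : Option String) : Prop := out = pick_percent_expression_label_py_alt cols
instance (cols : List (List (String × String))) (out : Option String) : Decidable (Spec_pick_percent_expression_label_py cols out) := by unfold Spec_pick_percent_expression_label_py; infer_instance

-- ===== CLAIM (what is proved, stated in full; the proofs are below) =====
def Claim_equal_pick_percent_expression_label_py : Prop := ∀ (cols : List (List (String × String))), Dom_pick_percent_expression_label_py cols → Spec_pick_percent_expression_label_py cols (pick_percent_expression_label_py cols)

-- ===== LEMMAS AND PROOFS =====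

-- ===== VERDICT (by name: the statement is the Claim_ definition above) =====
-- loop invariant: the single pass equals first pass, then the recorded fallback, then the second pass
theorem pvLoopB_eq (cols : List (List (String × String))) (fb : Option String) :
    pvLoopB cols fb =
      (match pvFirstPass cols with
       | some y => some y
       | none => match fb with
                 | some x => some x
                 | none => pvSecondPass cols) := by
  induction cols generalizing fb with
  | nil => cases fb <;> simp [pvLoopB, pvFirstPass, pvSecondPass]
  | cons c rest ih =>
    cases fb <;>
      by_cases hft : PySem.Str.lower ((pvGetA c "figure_type").getD "") = "percentage" <;>
        by_cases hel : PySem.Str.strip ((pvGetA c "expression_label").getD "") ≠ "" <;>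
          by_cases hpct : PySem.Str.isIn "pct"
              (PySem.Str.lower (PySem.Str.strip ((pvGetA c "expression_label").getD ""))) = true <;>
            simp_all [pvLoopB, pvFirstPass, pvSecondPass]

theorem pick_percent_expression_label_py_spec : Claim_equal_pick_percent_expression_label_py := by
  intro cols _
  unfold Spec_pick_percent_expression_label_py pick_percent_expression_label_py
    pick_percent_expression_label_py_alt
  rw [pvLoopB_eq]
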